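-- pv_equiv track=rewrite | github.com/ASSERT-KTH/Mokav | experiments/c4b/BADTI/iteration-10-sample-10-temp-1/generated_tests/2555/1991/temp_acc_qb.py | patched_func
-- ===== SOURCE A (Python) =====
-- def patched_func(*args):
-- 	global_list = []
--
-- 	s = args[0]
-- 	i = 0
-- 	count = 0
-- 	ans = False
-- 	while (i < (len(s) - 1)):
-- 	    if (s[i] == s[(i + 1)]):
-- 	        count = (count + 1)
-- 	        if (count == 6):
-- 	            ans = True
-- 	            break
-- 	    else:
-- 	        count = 0
-- 	    i = (i + 1)
-- 	if (ans == True):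
-- 	    global_list.append('YES')
-- 	else:
-- 	    global_list.append('NO')
-- 	return global_list
-- ===== SOURCE B (Python) =====
-- def patched_func(*args):
--     # Build maximal runs of equal characters, then answer YES iff some run has length >= 7.
--     s = args[0]
--     runs = []
--     for c in s:
--         if runs and runs[-1][0] == c:
--             runs[-1][1] += 1
--         else:
--             runs.append([c, 1])
--     ans = any(n >= 7 for _, n in runs)
--     return ['YES' if ans else 'NO']
-- ===== Notes on version B (the rewrite author's own statement) =====
-- stated objective: idiomatic
-- what changed: B splits the string into maximal runs of equal characters (groupby style) and answers YES iff some run has length >= 7, instead of A's index walk with a running adjacent-pair counter and break.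
import Mathlib
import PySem

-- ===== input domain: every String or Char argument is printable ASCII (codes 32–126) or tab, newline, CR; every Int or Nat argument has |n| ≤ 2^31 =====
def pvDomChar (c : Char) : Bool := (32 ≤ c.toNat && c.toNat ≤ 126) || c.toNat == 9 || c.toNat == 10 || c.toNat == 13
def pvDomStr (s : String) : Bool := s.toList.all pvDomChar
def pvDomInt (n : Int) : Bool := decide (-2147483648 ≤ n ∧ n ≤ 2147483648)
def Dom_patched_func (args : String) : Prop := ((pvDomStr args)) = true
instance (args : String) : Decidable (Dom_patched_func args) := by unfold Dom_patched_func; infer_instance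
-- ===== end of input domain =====

-- B groups the string into maximal runs of equal characters and answers YES iff some run has length >= 7,
-- instead of A's index walk with a running adjacent-pair counter; same cost, more idiomatic.


-- ===== PORT A =====
-- the while loop of A: i walks the indices, count counts consecutive equal adjacent pairs, breaks at 6
def patched_func_loop (s : List Char) (i : Nat) (count : Nat) : Bool :=
  if h : i < s.length - 1 then
    if s.getD i ' ' == s.getD (i + 1) ' ' then
      if count + 1 == 6 then true
      else patched_func_loop s (i + 1) (count + 1)
    else patched_func_loop s (i + 1) 0
  else false
termination_by s.length - i
decreasing_by all_goals omega

def patched_func (args : String) : List String :=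
  let s := args.toList
  let ans := patched_func_loop s 0 0
  if ans then ["YES"] else ["NO"]

-- ===== PORT B =====
-- Source B's loop body: runs is kept head-first (Source B appends/mutates at the tail; the fold conses at the head)
def pfRunStep (runs : List (Char × Nat)) (c : Char) : List (Char × Nat) :=
  match runs with
  | [] => [(c, 1)]
  | (d, n) :: rest => if d == c then (d, n + 1) :: rest else (c, 1) :: (d, n) :: rest

def patched_func_alt (args : String) : List String :=
  let runs := args.toList.foldl pfRunStep []
  let ans := runs.any (fun p => decide (7 ≤ p.2))
  [if ans then "YES" else "NO"]

-- ===== PRECONDITION & SPEC =====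
def Spec_patched_func (args : String) (out : List String) : Prop := out = patched_func_alt args
instance (args : String) (out : List String) : Decidable (Spec_patched_func args out) := by unfold Spec_patched_func; infer_instance

-- ===== CLAIM (what is proved, stated in full; the proofs are below) =====
def Claim_equal_patched_func : Prop := ∀ (args : String), Dom_patched_func args → Spec_patched_func args (patched_func args)

-- ===== LEMMAS AND PROOFS =====

-- A's loop restated as a structural recursion on the tail of the list
def pfHasCount : List Char → Nat → Bool
  | a :: b :: rest, count =>
      if a == b then
        if count + 1 == 6 then true else pfHasCount (b :: rest) (count + 1)
      else pfHasCount (b :: rest) 0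
  | _, _ => false

-- does the current run (char c, n occurrences so far) or any later run reach length 7?
def pfHasRun : List Char → Char → Nat → Bool
  | [], _, n => decide (7 ≤ n)
  | x :: xs, c, n => if x == c then pfHasRun xs c (n + 1) else (decide (7 ≤ n) || pfHasRun xs x 1)

theorem pfHasRun_of_big (l : List Char) (c : Char) (n : Nat) (h : 7 ≤ n) :
    pfHasRun l c n = true := by
  induction l generalizing c n with
  | nil => simp [pfHasRun, h]
  | cons x xs ih =>
    simp only [pfHasRun]
    split
    · exact ih c (n + 1) (by omega)
    · simp [h]

theorem patched_func_loop_eq (s : List Char) (i count : Nat) :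
    patched_func_loop s i count = pfHasCount (s.drop i) count := by
  induction hk : s.length - i using Nat.strong_induction_on generalizing i count with
  | _ k ih =>
    rw [patched_func_loop]
    split
    · rename_i h
      have h1 : i < s.length := by omega
      have h2 : i + 1 < s.length := by omega
      have hd : s.drop i = s[i] :: s[i+1] :: s.drop (i + 2) := by
        rw [List.drop_eq_getElem_cons h1, List.drop_eq_getElem_cons h2]
      have hd1 : s.drop (i + 1) = s[i+1] :: s.drop (i + 2) := List.drop_eq_getElem_cons h2
      rw [hd]
      simp only [pfHasCount, List.getD_eq_getElem s ' ' h1, List.getD_eq_getElem s ' ' h2]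
      split
      · split
        · rfl
        · rw [ih (s.length - (i+1)) (by omega) (i+1) (count+1) rfl, hd1]
      · rw [ih (s.length - (i+1)) (by omega) (i+1) 0 rfl, hd1]
    · rename_i h
      have : s.drop i = [] ∨ ∃ a, s.drop i = [a] := by
        rcases e : s.drop i with _ | ⟨a, _ | _⟩
        · exact Or.inl rfl
        · exact Or.inr ⟨a, rfl⟩
        · exfalso
          have := List.length_drop (l := s) (i := i)
          rw [e] at this
          simp at this; omega
      rcases this with e | ⟨a, e⟩ <;> rw [e] <;> rfl

theorem pfHasCount_eq_pfHasRun (l : List Char) (c : Char) (count : Nat) (h : count < 6) :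
    pfHasCount (c :: l) count = pfHasRun l c (count + 1) := by
  induction l generalizing c count with
  | nil =>
    simp only [pfHasCount, pfHasRun]
    have : ¬ (7 ≤ count + 1) := by omega
    simp [this]
  | cons x xs ih =>
    simp only [pfHasCount, pfHasRun]
    by_cases hcx : c = x
    · subst hcx
      simp only [beq_self_eq_true, if_true]
      by_cases h6 : count + 1 = 6
      · have : (count + 1 == 6) = true := by simp [h6]
        rw [this]
        simp only [if_true]
        exact (pfHasRun_of_big xs c (count + 1 + 1) (by omega)).symm
      · have : (count + 1 == 6) = false := by simp; omega
        rw [this]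
        simp only [Bool.false_eq_true, if_false]
        exact ih c (count + 1) (by omega)
    · have h1 : (c == x) = false := by simp [hcx]
      have h2 : (x == c) = false := by simp [Ne.symm hcx]
      rw [h1, h2]
      simp only [Bool.false_eq_true, if_false]
      have h7 : decide (7 ≤ count + 1) = false := by simp; omega
      rw [h7, Bool.false_or]
      exact ih x 0 (by omega)

theorem pf_foldl_any (l : List Char) (c : Char) (n : Nat) (rest : List (Char × Nat)) :
    (l.foldl pfRunStep ((c, n) :: rest)).any (fun p => decide (7 ≤ p.2))
      = (pfHasRun l c n || rest.any (fun p => decide (7 ≤ p.2))) := by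
  induction l generalizing c n rest with
  | nil => simp [pfHasRun]
  | cons x xs ih =>
    simp only [List.foldl_cons, pfRunStep, pfHasRun]
    by_cases hcx : c = x
    · subst hcx
      simp only [beq_self_eq_true, if_true]
      exact ih c (n + 1) rest
    · have h1 : (c == x) = false := by simp [hcx]
      have h2 : (x == c) = false := by simp [Ne.symm hcx]
      rw [h1, h2]
      simp only [Bool.false_eq_true, if_false]
      rw [ih x 1 ((c, n) :: rest)]
      simp [Bool.or_comm, Bool.or_assoc]

-- ===== VERDICT (by name: the statement is the Claim_ definition above) =====
theorem patched_func_spec : Claim_equal_patched_func := by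
  intro args _
  unfold Spec_patched_func patched_func patched_func_alt
  dsimp only
  rw [patched_func_loop_eq]
  cases h : args.toList with
  | nil => rfl
  | cons c tl =>
    simp only [List.drop_zero, List.foldl_cons]
    show (if pfHasCount (c :: tl) 0 then ["YES"] else ["NO"]) = _
    rw [pfHasCount_eq_pfHasRun tl c 0 (by omega)]
    have e2 : (List.foldl pfRunStep (pfRunStep [] c) tl).any (fun p => decide (7 ≤ p.2))
        = pfHasRun tl c 1 := by simpa using pf_foldl_any tl c 1 []
    simp only [e2]
    cases hb : pfHasRun tl c 1 <;> simp [hb]
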